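-- pv_equiv track=rewrite | github.com/jmullings/TheAnalystsProblem | VOLUME_I_FORMAL_REDUCTION/VOLUME_I_FORMAL_REDUCTION_PROOF/VOLUME_I_HILBERT_POLYA_HAMILTONIAN.py | _prime_factors_sieve
-- ===== SOURCE A (Python) =====
-- from typing import Dict, List, Optional, Sequence, Tuple
--
-- def _prime_factors_sieve(n: int, spf: list) -> List[int]:
--     factors: List[int] = []
--     while n > 1:
--         p = spf[n]
--         while n % p == 0:
--             factors.append(p)
--             n //= p
--     return factors
-- ===== SOURCE B (Python) =====
-- def _prime_factors_sieve(n: int, spf: list) -> list: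
--     # Recursive decomposition: peel one smallest-prime factor per call.
--     if n <= 1:
--         return []
--     p = spf[n]
--     return [p] + _prime_factors_sieve(n // p, spf)
-- ===== Notes on version B (the rewrite author's own statement) =====
-- stated objective: simpler
-- what changed: Replaces A's nested while-loops with accumulator by a one-factor-per-step recursion (p = spf[n]; [p] + recurse(n // p)), relying on the spf table to return the same smallest prime again while it still divides.
-- outside the precondition, e.g. on _prime_factors_sieve(4, [0, 1, 2, 3, -2]): A returns [-2, -2], B returns [-2]
import Mathlib
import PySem

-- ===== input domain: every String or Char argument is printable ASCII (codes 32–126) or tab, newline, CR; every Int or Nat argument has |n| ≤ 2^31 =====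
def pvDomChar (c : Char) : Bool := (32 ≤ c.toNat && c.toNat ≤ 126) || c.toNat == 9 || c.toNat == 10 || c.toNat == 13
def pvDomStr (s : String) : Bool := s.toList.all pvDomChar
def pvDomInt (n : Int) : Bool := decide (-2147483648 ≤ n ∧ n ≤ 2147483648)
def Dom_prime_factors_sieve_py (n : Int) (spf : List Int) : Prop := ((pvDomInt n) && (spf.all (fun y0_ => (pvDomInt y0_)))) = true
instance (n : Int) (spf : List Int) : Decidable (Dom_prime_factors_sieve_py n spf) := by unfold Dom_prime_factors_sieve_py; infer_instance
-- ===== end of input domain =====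

-- B replaces A's nested while-loops with a one-factor-per-step recursion (simpler decomposition, same cost).


-- ===== PORT A =====
-- inner 'while n % p == 0' loop; fuel bounds the iteration count and is never
-- exhausted on Pre_ inputs (each step divides n by p ≥ 2)
def pyInner (fuel : Nat) (n p : Int) (acc : List Int) : Int × List Int :=
  match fuel with
  | 0 => (n, acc)
  | f + 1 =>
    if PySem.Int.mod n p = 0 then
      pyInner f (PySem.Int.floordiv n p) p (acc ++ [p])
    else (n, acc)

-- outer 'while n > 1' loop; 'none' from pyGet? is Python's IndexError (excluded by Pre_)
def pyOuter (fuel : Nat) (n : Int) (spf : List Int) (acc : List Int) : List Int :=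
  match fuel with
  | 0 => acc
  | f + 1 =>
    if n > 1 then
      match PySem.List.pyGet? spf n with
      | none => acc
      | some p =>
        match pyInner n.toNat n p acc with
        | (n', acc') => pyOuter f n' spf acc'
    else acc

def prime_factors_sieve_py (n : Int) (spf : List Int) : List Int :=
  pyOuter n.toNat n spf []

-- ===== PORT B =====
-- recursion of Source B; fuel bounds recursion depth, never exhausted on Pre_ inputs
def altGo (fuel : Nat) (n : Int) (spf : List Int) : List Int :=
  match fuel with
  | 0 => []
  | f + 1 =>
    if n ≤ 1 then []
    else
      match PySem.List.pyGet? spf n with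
      | none => []
      | some p => p :: altGo f (PySem.Int.floordiv n p) spf

def prime_factors_sieve_py_alt (n : Int) (spf : List Int) : List Int :=
  altGo n.toNat n spf

-- ===== PRECONDITION & SPEC =====
-- Pre_ admits n ≤ 1 (both trivially return []) and otherwise requires spf to be a
-- correct smallest-prime-factor table covering n. On invalid tables A may diverge,
-- raise (IndexError/ZeroDivisionError) or return meaningless values (see cites);
-- on n ≥ spf length A raises IndexError.
def Pre_prime_factors_sieve_py (n : Int) (spf : List Int) : Prop :=
  n ≤ 1 ∨ (2 ≤ n ∧ n < (spf.length : Int) ∧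
    ∀ m : Nat, m < spf.length → 2 ≤ m →
      2 ≤ spf.getD m 0 ∧ (spf.getD m 0).toNat ∣ m ∧
        ∀ k : Nat, k < (spf.getD m 0).toNat → 2 ≤ k → ¬ k ∣ m)
instance (n : Int) (spf : List Int) : Decidable (Pre_prime_factors_sieve_py n spf) := by
  unfold Pre_prime_factors_sieve_py; infer_instance

def pvWitness_prime_factors_sieve_py : Int × List Int :=
  (12, [0, 0, 2, 3, 2, 5, 2, 7, 2, 3, 2, 11, 2])

def Spec_prime_factors_sieve_py (n : Int) (spf : List Int) (out : List Int) : Prop := out = prime_factors_sieve_py_alt n spf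
instance (n : Int) (spf : List Int) (out : List Int) : Decidable (Spec_prime_factors_sieve_py n spf out) := by unfold Spec_prime_factors_sieve_py; infer_instance

-- ===== CLAIM (what is proved, stated in full; the proofs are below) =====
def Claim_equal_prime_factors_sieve_py : Prop := ∀ (n : Int) (spf : List Int), Dom_prime_factors_sieve_py n spf → Pre_prime_factors_sieve_py n spf → Spec_prime_factors_sieve_py n spf (prime_factors_sieve_py n spf)

-- ===== LEMMAS AND PROOFS =====

-- result of the inner loop: strip all factors p from m, collecting them
def stripQuot (p m : Nat) : Nat × List Nat :=
  if _h : 2 ≤ p ∧ 1 ≤ m ∧ p ∣ m then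
    let r := stripQuot p (m / p)
    (r.1, p :: r.2)
  else (m, [])
termination_by m
decreasing_by exact Nat.div_lt_self (by omega) (by omega)

theorem stripQuot_pos (p m : Nat) (h : 2 ≤ p ∧ 1 ≤ m ∧ p ∣ m) :
    stripQuot p m = ((stripQuot p (m / p)).1, p :: (stripQuot p (m / p)).2) := by
  rw [stripQuot, dif_pos h]

theorem stripQuot_neg (p m : Nat) (h : ¬ (2 ≤ p ∧ 1 ≤ m ∧ p ∣ m)) :
    stripQuot p m = (m, []) := by
  rw [stripQuot, dif_neg h]

theorem stripQuot_fst_le (p m : Nat) : (stripQuot p m).1 ≤ m := by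
  induction m using Nat.strong_induction_on with
  | _ m ih =>
    rw [stripQuot]
    split_ifs with h
    · have hlt : m / p < m := Nat.div_lt_self (by omega) (by omega)
      exact le_trans (ih _ hlt) (le_of_lt hlt)
    · simp

theorem stripQuot_fst_pos (p m : Nat) (hm : 1 ≤ m) : 1 ≤ (stripQuot p m).1 := by
  induction m using Nat.strong_induction_on with
  | _ m ih =>
    rw [stripQuot]
    split_ifs with h
    · exact ih _ (Nat.div_lt_self (by omega) (by omega))
        (Nat.div_pos (Nat.le_of_dvd hm h.2.2) (by omega))
    · simpa using hm

theorem stripQuot_fst_lt (p m : Nat) (hp : 2 ≤ p) (hm : 1 ≤ m) (hd : p ∣ m) :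
    (stripQuot p m).1 < m := by
  rw [stripQuot, dif_pos ⟨hp, hm, hd⟩]
  exact lt_of_le_of_lt (stripQuot_fst_le p (m / p)) (Nat.div_lt_self (by omega) (by omega))

theorem inner_eq (m : Nat) : ∀ (f : Nat) (p : Nat) (acc : List Int),
    1 ≤ m → 2 ≤ p → m ≤ f →
    pyInner f (m : Int) (p : Int) acc =
      (((stripQuot p m).1 : Int), acc ++ ((stripQuot p m).2).map (fun x => (x : Int))) := by
  induction m using Nat.strong_induction_on with
  | _ m ih =>
    intro f p acc h1 hp hf
    obtain ⟨f, rfl⟩ : ∃ f', f = f' + 1 := ⟨f - 1, by omega⟩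
    simp only [pyInner, PySem.Int.mod_natCast, PySem.Int.floordiv_natCast]
    by_cases hd : p ∣ m
    · have hmod : m % p = 0 := Nat.mod_eq_zero_of_dvd hd
      have hq1 : 1 ≤ m / p := Nat.div_pos (Nat.le_of_dvd h1 hd) (by omega)
      have hqlt : m / p < m := Nat.div_lt_self (by omega) (by omega)
      rw [if_pos (by exact_mod_cast hmod)]
      rw [ih (m / p) hqlt f p (acc ++ [(p : Int)]) hq1 hp (by omega)]
      rw [stripQuot_pos p m ⟨hp, h1, hd⟩]
      simp
    · have hmod : ¬ m % p = 0 := fun h => hd (Nat.dvd_of_mod_eq_zero h)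
      rw [if_neg (by exact_mod_cast hmod)]
      rw [stripQuot_neg p m (by tauto)]
      simp

theorem pf_cons (m : Nat) (h : 2 ≤ m) :
    m.primeFactorsList = m.minFac :: (m / m.minFac).primeFactorsList := by
  match m, h with
  | (k+2), _ => rw [Nat.primeFactorsList]

theorem strip_factors (m : Nat) : 1 ≤ m → ∀ p : Nat, p.Prime →
    (∀ q : Nat, q.Prime → q ∣ m → p ≤ q) →
    Nat.primeFactorsList m = (stripQuot p m).2 ++ Nat.primeFactorsList (stripQuot p m).1 := by
  induction m using Nat.strong_induction_on with
  | _ m ih =>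
    intro h1 p hp hmin
    by_cases hd : p ∣ m
    · have hp2 : 2 ≤ p := hp.two_le
      have hpm : p ≤ m := Nat.le_of_dvd h1 hd
      have hm2 : 2 ≤ m := by omega
      have hminfac : m.minFac = p := by
        have h1' : m.minFac ≤ p := Nat.minFac_le_of_dvd hp2 hd
        have h2' : p ≤ m.minFac := hmin _ (Nat.minFac_prime (by omega)) (Nat.minFac_dvd m)
        omega
      rw [stripQuot_pos p m ⟨hp2, h1, hd⟩]
      rw [pf_cons m hm2, hminfac]
      have hq1 : 1 ≤ m / p := Nat.div_pos hpm (by omega)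
      have hqlt : m / p < m := Nat.div_lt_self (by omega) (by omega)
      rw [ih (m / p) hqlt hq1 p hp
        (fun q hq hqd => hmin q hq (hqd.trans (Nat.div_dvd_of_dvd hd)))]
      simp
    · rw [stripQuot_neg p m (by tauto)]
      simp

theorem table_minFac (spf : List Int)
    (htab : ∀ m : Nat, m < spf.length → 2 ≤ m →
      2 ≤ spf.getD m 0 ∧ (spf.getD m 0).toNat ∣ m ∧
        ∀ k : Nat, k < (spf.getD m 0).toNat → 2 ≤ k → ¬ k ∣ m)
    (m : Nat) (hml : m < spf.length) (hm2 : 2 ≤ m) :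
    spf.getD m 0 = (Nat.minFac m : Int) := by
  obtain ⟨h2, hdvd, hmin⟩ := htab m hml hm2
  set v := (spf.getD m 0).toNat with hv
  have hv2 : 2 ≤ v := by omega
  have hle : m.minFac ≤ v := Nat.minFac_le_of_dvd hv2 hdvd
  have hne : ¬ m.minFac < v := fun hlt =>
    hmin m.minFac hlt (Nat.minFac_prime (by omega)).two_le (Nat.minFac_dvd m)
  have : v = m.minFac := by omega
  omega

theorem outer_eq (m : Nat) : ∀ (f : Nat) (acc : List Int) (spf : List Int),
    (∀ k : Nat, k < spf.length → 2 ≤ k → spf.getD k 0 = (Nat.minFac k : Int)) →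
    1 ≤ m → (2 ≤ m → m < spf.length) → m ≤ f →
    pyOuter f (m : Int) spf acc =
      acc ++ (Nat.primeFactorsList m).map (fun x => (x : Int)) := by
  induction m using Nat.strong_induction_on with
  | _ m ih =>
    intro f acc spf htab h1 hlen hf
    obtain ⟨f, rfl⟩ : ∃ f', f = f' + 1 := ⟨f - 1, by omega⟩
    by_cases hm2 : 2 ≤ m
    · have hml := hlen hm2
      have hget : PySem.List.pyGet? spf (m : Int) = some ((Nat.minFac m : Nat) : Int) := by
        rw [PySem.List.pyGet?_natCast]
        rw [List.getElem?_eq_getElem hml]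
        rw [← List.getD_eq_getElem spf 0 hml, htab m hml hm2]
      have hp := Nat.minFac_prime (show m ≠ 1 by omega)
      have hp2 : 2 ≤ m.minFac := hp.two_le
      simp only [pyOuter, if_pos (show (m : Int) > 1 by exact_mod_cast hm2), hget,
        Int.toNat_natCast]
      rw [inner_eq m m m.minFac acc h1 hp2 le_rfl]
      set m' := (stripQuot m.minFac m).1 with hm'
      have hlt : m' < m := stripQuot_fst_lt _ _ hp2 h1 (Nat.minFac_dvd m)
      have hpos : 1 ≤ m' := stripQuot_fst_pos _ _ h1
      rw [ih m' hlt f _ spf htab hpos (fun _ => by omega) (by omega)]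
      rw [strip_factors m h1 m.minFac hp
        (fun q hq hqd => Nat.minFac_le_of_dvd hq.two_le hqd)]
      simp [hm']
    · have : m = 1 := by omega
      subst this
      simp only [pyOuter, if_neg (show ¬ ((1:Nat) : Int) > 1 by norm_num)]
      simp [Nat.primeFactorsList_one]

theorem alt_eq (m : Nat) : ∀ (f : Nat) (spf : List Int),
    (∀ k : Nat, k < spf.length → 2 ≤ k → spf.getD k 0 = (Nat.minFac k : Int)) →
    (2 ≤ m → m < spf.length) → m ≤ f →
    altGo f (m : Int) spf = (Nat.primeFactorsList m).map (fun x => (x : Int)) := by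
  induction m using Nat.strong_induction_on with
  | _ m ih =>
    intro f spf htab hlen hf
    by_cases hm2 : 2 ≤ m
    · obtain ⟨f, rfl⟩ : ∃ f', f = f' + 1 := ⟨f - 1, by omega⟩
      have hml := hlen hm2
      have hget : PySem.List.pyGet? spf (m : Int) = some ((Nat.minFac m : Nat) : Int) := by
        rw [PySem.List.pyGet?_natCast]
        rw [List.getElem?_eq_getElem hml]
        rw [← List.getD_eq_getElem spf 0 hml, htab m hml hm2]
      have hp2 : 2 ≤ m.minFac := (Nat.minFac_prime (show m ≠ 1 by omega)).two_le
      simp only [altGo, if_neg (show ¬ (m : Int) ≤ 1 by exact_mod_cast not_le.mpr hm2), hget,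
        PySem.Int.floordiv_natCast]
      have hqlt : m / m.minFac < m := Nat.div_lt_self (by omega) (by omega)
      rw [ih (m / m.minFac) hqlt f spf htab (fun _ => by omega) (by omega)]
      rw [pf_cons m hm2]
      simp
    · rcases (show m = 0 ∨ m = 1 by omega) with rfl | rfl
      · cases f <;> simp [altGo, Nat.primeFactorsList_zero]
      · obtain ⟨f, rfl⟩ : ∃ f', f = f' + 1 := ⟨f - 1, by omega⟩
        simp [altGo, Nat.primeFactorsList_one]

theorem outer_trivial (f : Nat) (n : Int) (spf : List Int) (acc : List Int) (h : n ≤ 1) :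
    pyOuter f n spf acc = acc := by
  cases f with
  | zero => rfl
  | succ f => simp only [pyOuter, if_neg (show ¬ n > 1 by omega)]

theorem alt_trivial (f : Nat) (n : Int) (spf : List Int) (h : n ≤ 1) :
    altGo f n spf = [] := by
  cases f with
  | zero => rfl
  | succ f => simp [altGo, h]

-- ===== VERDICT (by name: the statement is the Claim_ definition above) =====
theorem prime_factors_sieve_py_spec : Claim_equal_prime_factors_sieve_py := by
  intro n spf _ hpre
  unfold Spec_prime_factors_sieve_py prime_factors_sieve_py prime_factors_sieve_py_alt
  rcases hpre with h1 | ⟨h2, hlen, htab⟩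
  · rw [outer_trivial _ _ _ _ h1, alt_trivial _ _ _ h1]
  · have hm : n = ((n.toNat : Nat) : Int) := by omega
    set m := n.toNat with hmdef
    have hm2 : 2 ≤ m := by omega
    have hml : m < spf.length := by omega
    rw [hm, outer_eq m m [] spf (table_minFac spf htab) (by omega) (fun _ => hml) le_rfl,
        alt_eq m m spf (table_minFac spf htab) (fun _ => hml) le_rfl]
    simp
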